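-- pv_equiv track=rewrite | github.com/brenesamerica/aoc2024 | day16/162.py | visualize_combined_map
-- ===== SOURCE A (Python) =====
-- def visualize_combined_map(grid, paths):
--     grid_copy = [row[:] for row in grid]
--     for path in paths:
--         for x, y in path:
--             if grid_copy[y][x] in {'.', 'S', 'E'}:
--                 grid_copy[y][x] = 'O'
--     total_tiles = sum(row.count('O') for row in grid_copy)
--     return '\n'.join(''.join(row) for row in grid_copy), total_tiles
-- ===== SOURCE B (Python) =====
-- def visualize_combined_map(grid, paths):
--     hit = [[False] * len(row) for row in grid]
--     for path in paths:
--         for x, y in path: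
--             hit[y][x] = True
--     lines = []
--     total = 0
--     for r, row in enumerate(grid):
--         chars = []
--         for c, ch in enumerate(row):
--             if hit[r][c] and ch in {'.', 'S', 'E'}:
--                 ch = 'O'
--             if ch == 'O':
--                 total += 1
--             chars.append(ch)
--         lines.append(''.join(chars))
--     return '\n'.join(lines), total
-- ===== Notes on version B (the rewrite author's own statement) =====
-- stated objective: alternative
-- what changed: B never mutates the character grid: it stamps path coordinates unconditionally into a boolean hit-grid, then renders and counts in a single fused pass that decides each output cell from the original character and its hit bit, eliminating A's copy, conditional in-place marking and separate counting re-scan.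
import Mathlib
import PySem

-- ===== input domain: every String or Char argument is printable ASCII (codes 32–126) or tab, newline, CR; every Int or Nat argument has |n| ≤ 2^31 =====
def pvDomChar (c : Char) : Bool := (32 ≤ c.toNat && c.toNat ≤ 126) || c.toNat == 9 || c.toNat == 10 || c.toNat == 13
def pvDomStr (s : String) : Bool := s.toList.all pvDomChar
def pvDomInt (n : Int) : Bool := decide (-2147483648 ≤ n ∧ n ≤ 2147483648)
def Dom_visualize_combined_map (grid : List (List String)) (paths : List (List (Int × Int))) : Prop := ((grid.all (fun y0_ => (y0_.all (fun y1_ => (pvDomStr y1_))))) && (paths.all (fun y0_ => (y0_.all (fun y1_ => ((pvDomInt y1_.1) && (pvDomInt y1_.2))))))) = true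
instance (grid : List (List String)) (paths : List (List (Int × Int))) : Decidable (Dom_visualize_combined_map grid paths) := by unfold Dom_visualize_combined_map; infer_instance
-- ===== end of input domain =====

-- B replaces A's copy-mutate-then-recount scheme by an unconditional boolean hit-grid stamp
-- followed by one fused render-and-count pass (objective: alternative decomposition, same cost).

-- ===== PORT A =====
-- one step of A's inner loop: "if grid_copy[y][x] in {'.','S','E'}: grid_copy[y][x] = 'O'"
def pvMarkA (g : List (List String)) (p : Int × Int) : List (List String) :=
  if PySem.List.pyGetD (PySem.List.pyGetD g p.2 []) p.1 "" == "."
      || PySem.List.pyGetD (PySem.List.pyGetD g p.2 []) p.1 "" == "S"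
      || PySem.List.pyGetD (PySem.List.pyGetD g p.2 []) p.1 "" == "E" then
    PySem.List.pySetD g p.2 (PySem.List.pySetD (PySem.List.pyGetD g p.2 []) p.1 "O")
  else g

def visualize_combined_map (grid : List (List String)) (paths : List (List (Int × Int))) : String × Int :=
  let grid_copy := paths.foldl (fun g path => path.foldl pvMarkA g) grid
  let total : Int := grid_copy.foldl (fun acc row => acc + (PySem.List.count row "O" : Int)) 0
  (PySem.Str.join "\n" (grid_copy.map (fun row => PySem.Str.join "" row)), total)

-- ===== PORT B =====
-- one step of B's stamping loop: "hit[y][x] = True"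
def pvStamp (h : List (List Bool)) (p : Int × Int) : List (List Bool) :=
  PySem.List.pySetD h p.2 (PySem.List.pySetD (PySem.List.pyGetD h p.2 []) p.1 true)

-- B's per-cell render: "'O' if hit[r][c] and ch in {'.','S','E'} else ch"
-- (r, c come from enumerate, hence nonnegative and in range: plain list indexing is exact here)
def pvRenderCell (hit : List (List Bool)) (r c : Int) (ch : String) : String :=
  if PySem.List.pyGetD (PySem.List.pyGetD hit r []) c false
      && (ch == "." || ch == "S" || ch == "E") then "O" else ch

def visualize_combined_map_alt (grid : List (List String)) (paths : List (List (Int × Int))) : String × Int :=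
  let hit := paths.foldl (fun h path => path.foldl pvStamp h)
      (grid.map (fun row => List.replicate row.length false))
  let res := (PySem.List.enumerate grid).foldl (fun (st : List String × Int) yr =>
      let inner := (PySem.List.enumerate yr.2).foldl (fun (st2 : List String × Int) xc =>
          let ch := pvRenderCell hit yr.1 xc.1 xc.2
          (st2.1 ++ [ch], st2.2 + (if ch == "O" then (1 : Int) else 0)))
        (([] : List String), st.2)
      (st.1 ++ [PySem.Str.join "" inner.1], inner.2)) (([] : List String), (0 : Int))
  (PySem.Str.join "\n" res.1, res.2)

-- ===== PRECONDITION & SPEC =====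
-- Pre_ excludes exactly the out-of-range path coordinates on which A raises IndexError.
def Pre_visualize_combined_map (grid : List (List String)) (paths : List (List (Int × Int))) : Prop :=
  ∀ path ∈ paths, ∀ p ∈ path,
    PySem.Raise.InRange grid.length p.2 ∧
    PySem.Raise.InRange (PySem.List.pyGetD grid p.2 []).length p.1

instance (grid : List (List String)) (paths : List (List (Int × Int))) : Decidable (Pre_visualize_combined_map grid paths) := by
  unfold Pre_visualize_combined_map PySem.Raise.InRange; infer_instance

def pvWitness_visualize_combined_map : List (List String) × (List (List (Int × Int))) :=
  ([["S", "."], [".", "E"]], [[(0, 0), (1, 0), (1, 1)]])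

def Spec_visualize_combined_map (grid : List (List String)) (paths : List (List (Int × Int))) (out : String × Int) : Prop := out = visualize_combined_map_alt grid paths
instance (grid : List (List String)) (paths : List (List (Int × Int))) (out : String × Int) : Decidable (Spec_visualize_combined_map grid paths out) := by unfold Spec_visualize_combined_map; infer_instance

-- ===== CLAIM (what is proved, stated in full; the proofs are below) =====
def Claim_equal_visualize_combined_map : Prop := ∀ (grid : List (List String)) (paths : List (List (Int × Int))), Dom_visualize_combined_map grid paths → Pre_visualize_combined_map grid paths → Spec_visualize_combined_map grid paths (visualize_combined_map grid paths)

-- ===== LEMMAS AND PROOFS =====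

-- normalized (wrapped) Python index
def pvNorm (n : Nat) (i : Int) : Int := if i ≥ 0 then i else i + n

lemma pvNorm_lt {n : Nat} {i : Int} (h : PySem.Raise.InRange n i) : (pvNorm n i).toNat < n := by
  obtain ⟨h1, h2⟩ := h; unfold pvNorm; split <;> omega

lemma pyIdx?_eq_norm {n : Nat} {i : Int} (h : PySem.Raise.InRange n i) :
    PySem.List.pyIdx? n i = some (pvNorm n i).toNat := by
  obtain ⟨h1, h2⟩ := h
  simp only [PySem.List.pyIdx?, pvNorm]
  split_ifs <;> first | exact absurd rfl (by omega) | exact congrArg some (by omega)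

lemma pyGetD_norm {α : Type} (xs : List α) (i : Int) (d : α) (h : PySem.Raise.InRange xs.length i) :
    PySem.List.pyGetD xs i d = xs.getD (pvNorm xs.length i).toNat d := by
  simp only [PySem.List.pyGetD, PySem.List.pyGet?, pyIdx?_eq_norm h, Option.bind_some]
  have := pvNorm_lt h
  simp [List.getD, List.getElem?_eq_getElem this]

lemma pySetD_norm {α : Type} (xs : List α) (i : Int) (v : α) (h : PySem.Raise.InRange xs.length i) :
    PySem.List.pySetD xs i v = xs.set (pvNorm xs.length i).toNat v := by
  simp only [PySem.List.pySetD, PySem.List.pySet?, pyIdx?_eq_norm h, Option.map_some, Option.getD_some]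

-- cell-level mark test, as both Pythons phrase it
def pvMk (c : String) : Bool := c == "." || c == "S" || c == "E"

-- The state invariant tying A's mutated grid g and B's boolean hit-grid h to the original grid.
def pvInv (grid g : List (List String)) (h : List (List Bool)) : Prop :=
  g.length = grid.length ∧ h.length = grid.length ∧
  (∀ y, y < grid.length →
    (g.getD y []).length = (grid.getD y []).length ∧
    (h.getD y []).length = (grid.getD y []).length ∧
    ∀ x, x < (grid.getD y []).length →
      (g.getD y []).getD x "" =
        (if (h.getD y []).getD x false && pvMk ((grid.getD y []).getD x "")
         then "O" else (grid.getD y []).getD x ""))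

def pvPreP (grid : List (List String)) (p : Int × Int) : Prop :=
  PySem.Raise.InRange grid.length p.2 ∧
  PySem.Raise.InRange (PySem.List.pyGetD grid p.2 []).length p.1

-- one step preserves the invariant
lemma pvStep (grid g : List (List String)) (h : List (List Bool)) (p : Int × Int)
    (hp : pvPreP grid p) (hI : pvInv grid g h) :
    pvInv grid (pvMarkA g p) (pvStamp h p) := by
  obtain ⟨hglen, hhlen, hcell⟩ := hI
  obtain ⟨hpy, hpx⟩ := hp
  set ny := (pvNorm grid.length p.2).toNat with hny
  have hnylt : ny < grid.length := pvNorm_lt hpy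
  have hrowg : PySem.List.pyGetD grid p.2 [] = grid.getD ny [] := pyGetD_norm _ _ _ hpy
  have hlenrowg : (g.getD ny []).length = (grid.getD ny []).length := (hcell ny hnylt).1
  have hlenrowh : (h.getD ny []).length = (grid.getD ny []).length := (hcell ny hnylt).2.1
  have hpyg : PySem.Raise.InRange g.length p.2 := by rw [hglen]; exact hpy
  have hpyh : PySem.Raise.InRange h.length p.2 := by rw [hhlen]; exact hpy
  have hrowA : PySem.List.pyGetD g p.2 [] = g.getD ny [] := by
    rw [pyGetD_norm g p.2 [] hpyg, hglen]
  have hrowH : PySem.List.pyGetD h p.2 [] = h.getD ny [] := by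
    rw [pyGetD_norm h p.2 [] hpyh, hhlen]
  have hpx' : PySem.Raise.InRange (grid.getD ny []).length p.1 := by rwa [hrowg] at hpx
  set nx := (pvNorm (grid.getD ny []).length p.1).toNat with hnx
  have hnxlt : nx < (grid.getD ny []).length := pvNorm_lt hpx'
  have hpxg : PySem.Raise.InRange (g.getD ny []).length p.1 := by rw [hlenrowg]; exact hpx'
  have hpxh : PySem.Raise.InRange (h.getD ny []).length p.1 := by rw [hlenrowh]; exact hpx'
  have hcA : PySem.List.pyGetD (PySem.List.pyGetD g p.2 []) p.1 "" = (g.getD ny []).getD nx "" := by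
    rw [hrowA, pyGetD_norm _ _ _ hpxg, hlenrowg]
  have hval := (hcell ny hnylt).2.2 nx hnxlt
  have hnyg : ny < g.length := by rw [hglen]; exact hnylt
  have hnyh : ny < h.length := by rw [hhlen]; exact hnylt
  -- B's stamp is h with cell (ny,nx) set to true
  have hstamp : pvStamp h p = h.set ny ((h.getD ny []).set nx true) := by
    unfold pvStamp
    rw [pySetD_norm h p.2 _ hpyh, hrowH, pySetD_norm _ _ _ hpxh, hlenrowh, hhlen]
  -- A's step is either a no-op or g with cell (ny,nx) set to "O"
  have hsetA : PySem.List.pySetD g p.2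
        (PySem.List.pySetD (PySem.List.pyGetD g p.2 []) p.1 "O")
      = g.set ny ((g.getD ny []).set nx "O") := by
    rw [pySetD_norm g p.2 _ hpyg, hrowA, pySetD_norm _ _ _ hpxg, hglen, hlenrowg]
  -- the new cell invariant, uniform in whether A writes
  have hkey : ∀ (g' : List (List String)),
      g'.length = grid.length →
      (∀ y, y < grid.length → (g'.getD y []).length = (grid.getD y []).length) →
      (∀ y, y < grid.length → ∀ x, x < (grid.getD y []).length →
        (g'.getD y []).getD x "" =
          (if ((y, x) = (ny, nx) || (h.getD y []).getD x false)
              && pvMk ((grid.getD y []).getD x "")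
           then "O" else (grid.getD y []).getD x "")) →
      pvInv grid g' (pvStamp h p) := by
    intro g' hlen' hrl' hc'
    rw [hstamp]
    refine ⟨hlen', by simp [List.length_set, hhlen], ?_⟩
    intro y hy
    have hyh : y < h.length := by rw [hhlen]; exact hy
    have hyset : y < (h.set ny ((h.getD ny []).set nx true)).length := by
      simpa [List.length_set] using hyh
    have hgetDset : (h.set ny ((h.getD ny []).set nx true)).getD y []
        = if ny = y then (h.getD ny []).set nx true else h.getD y [] := by
      rw [List.getD_eq_getElem _ [] hyset, List.getElem_set]
      split
      · rfl
      · rw [List.getD_eq_getElem h [] hyh]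
    refine ⟨hrl' y hy, ?_, ?_⟩
    · rw [hgetDset]
      by_cases hyy : ny = y
      · subst hyy; rw [if_pos rfl, List.length_set]; exact hlenrowh
      · rw [if_neg hyy]; exact (hcell y hy).2.1
    · intro x hx
      rw [hc' y hy x hx, hgetDset]
      by_cases hyy : ny = y
      · subst hyy
        rw [if_pos rfl]
        have hxh : x < (h.getD ny []).length := by rw [hlenrowh]; exact hx
        have hxset : x < ((h.getD ny []).set nx true).length := by
          simpa [List.length_set] using hxh
        rw [List.getD_eq_getElem _ false hxset, List.getElem_set]
        by_cases hxx : nx = x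
        · subst hxx; simp
        · rw [if_neg hxx, ← List.getD_eq_getElem (h.getD ny []) false hxh]
          have : ((ny, x) = (ny, nx)) = False := by
            simp only [Prod.mk.injEq, true_and, eq_iff_iff, iff_false]
            exact fun hc => hxx hc.symm
          simp [this]
      · rw [if_neg hyy]
        have : ((y, x) = (ny, nx)) = False := by
          simp only [Prod.mk.injEq, eq_iff_iff, iff_false]
          exact fun hc => hyy hc.1.symm
        simp [this]
  unfold pvMarkA
  rw [hcA]
  by_cases hmk : pvMk ((grid.getD ny []).getD nx "") = true
  · by_cases hbit : (h.getD ny []).getD nx false = true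
    · -- already marked: A sees "O", no write
      have hvO : (g.getD ny []).getD nx "" = "O" := by
        rw [hval, hbit, hmk]; rfl
      rw [hvO]
      have hO : (("O" == ".") || ("O" == "S") || ("O" == "E")) = false := by decide
      rw [hO]
      simp only [Bool.false_eq_true, if_false]
      refine hkey g hglen (fun y hy => (hcell y hy).1) ?_
      intro y hy x hx
      rw [(hcell y hy).2.2 x hx]
      by_cases hp' : ((y, x) = (ny, nx))
      · have hy' : y = ny := (Prod.mk.injEq _ _ _ _ ▸ hp').1
        have hx' : x = nx := (Prod.mk.injEq _ _ _ _ ▸ hp').2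
        subst hy'; subst hx'
        rw [hbit, hmk]; simp
      · simp [hp']
    · -- fresh markable cell: A writes "O"
      have hbitf : (h.getD ny []).getD nx false = false := by
        cases hb : (h.getD ny []).getD nx false
        · rfl
        · exact absurd hb hbit
      have hvOrig : (g.getD ny []).getD nx "" = (grid.getD ny []).getD nx "" := by
        rw [hval, hbitf]; simp
      rw [hvOrig]
      have hmk' := hmk
      unfold pvMk at hmk'
      rw [hmk']
      simp only [if_pos]
      rw [hsetA]
      refine hkey _ (by simp [List.length_set, hglen]) ?_ ?_
      · intro y hy
        have hyg : y < g.length := by rw [hglen]; exact hy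
        have hyset : y < (g.set ny ((g.getD ny []).set nx "O")).length := by
          simpa [List.length_set] using hyg
        rw [List.getD_eq_getElem _ [] hyset, List.getElem_set]
        split
        · next hyy => subst hyy; rw [List.length_set]; exact hlenrowg
        · rw [← List.getD_eq_getElem g [] hyg]; exact (hcell y hy).1
      · intro y hy x hx
        have hyg : y < g.length := by rw [hglen]; exact hy
        have hyset : y < (g.set ny ((g.getD ny []).set nx "O")).length := by
          simpa [List.length_set] using hyg
        have hgetDsetg : (g.set ny ((g.getD ny []).set nx "O")).getD y []
            = if ny = y then (g.getD ny []).set nx "O" else g.getD y [] := by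
          rw [List.getD_eq_getElem _ [] hyset, List.getElem_set]
          split
          · rfl
          · rw [List.getD_eq_getElem g [] hyg]
        rw [hgetDsetg]
        by_cases hyy : ny = y
        · subst hyy
          rw [if_pos rfl]
          have hxg : x < (g.getD ny []).length := by rw [hlenrowg]; exact hx
          have hxset : x < ((g.getD ny []).set nx "O").length := by
            simpa [List.length_set] using hxg
          rw [List.getD_eq_getElem _ "" hxset, List.getElem_set]
          by_cases hxx : nx = x
          · subst hxx
            rw [if_pos rfl]
            have hd : (decide ((ny, nx) = (ny, nx)) : Bool) = true := by simp
            rw [hd, Bool.true_or, Bool.true_and, hmk]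
            rfl
          · rw [if_neg hxx, ← List.getD_eq_getElem (g.getD ny []) "" hxg,
              (hcell ny hnylt).2.2 x hx]
            have : ((ny, x) = (ny, nx)) = False := by
              simp only [Prod.mk.injEq, true_and, eq_iff_iff, iff_false]
              exact fun hc => hxx hc.symm
            simp [this]
        · rw [if_neg hyy, (hcell y hy).2.2 x hx]
          have : ((y, x) = (ny, nx)) = False := by
            simp only [Prod.mk.injEq, eq_iff_iff, iff_false]
            exact fun hc => hyy hc.1.symm
          simp [this]
  · -- unmarkable cell: A is a no-op whether or not the bit was set
    have hmkf : pvMk ((grid.getD ny []).getD nx "") = false := by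
      cases hb : pvMk ((grid.getD ny []).getD nx "")
      · rfl
      · exact absurd hb hmk
    have hvOrig : (g.getD ny []).getD nx "" = (grid.getD ny []).getD nx "" := by
      rw [hval, hmkf]; simp
    rw [hvOrig]
    have hmkf' := hmkf
    unfold pvMk at hmkf'
    rw [hmkf']
    simp only [Bool.false_eq_true, if_false]
    refine hkey g hglen (fun y hy => (hcell y hy).1) ?_
    intro y hy x hx
    rw [(hcell y hy).2.2 x hx]
    by_cases hp' : ((y, x) = (ny, nx))
    · have hy' : y = ny := (Prod.mk.injEq _ _ _ _ ▸ hp').1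
      have hx' : x = nx := (Prod.mk.injEq _ _ _ _ ▸ hp').2
      subst hy'; subst hx'
      rw [hmkf]; simp
    · simp [hp']

lemma pvFoldPath (grid : List (List String)) (path : List (Int × Int)) :
    ∀ (g : List (List String)) (h : List (List Bool)),
    (∀ p ∈ path, pvPreP grid p) → pvInv grid g h →
    pvInv grid (path.foldl pvMarkA g) (path.foldl pvStamp h) := by
  induction path with
  | nil => intro g h _ hI; exact hI
  | cons p path ih =>
    intro g h hpre hI
    exact ih _ _ (fun q hq => hpre q (by simp [hq])) (pvStep grid g h p (hpre p (by simp)) hI)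

lemma pvFoldPaths (grid : List (List String)) (paths : List (List (Int × Int))) :
    ∀ (g : List (List String)) (h : List (List Bool)),
    (∀ path ∈ paths, ∀ p ∈ path, pvPreP grid p) → pvInv grid g h →
    pvInv grid (paths.foldl (fun g path => path.foldl pvMarkA g) g)
      (paths.foldl (fun h path => path.foldl pvStamp h) h) := by
  induction paths with
  | nil => intro g h _ hI; exact hI
  | cons path paths ih =>
    intro g h hpre hI
    exact ih _ _ (fun q hq => hpre q (by simp [hq]))
      (pvFoldPath grid path g h (hpre path (by simp)) hI)

-- initial invariant
lemma pvInit (grid : List (List String)) :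
    pvInv grid grid (grid.map (fun row => List.replicate row.length false)) := by
  refine ⟨rfl, by simp, ?_⟩
  intro y hy
  have hrow : (grid.map (fun row => List.replicate row.length false)).getD y []
      = List.replicate (grid.getD y []).length false := by
    have hy' : y < (grid.map (fun row => List.replicate row.length false)).length := by
      simpa using hy
    rw [List.getD_eq_getElem _ [] hy', List.getElem_map, List.getD_eq_getElem grid [] hy]
  rw [hrow]
  refine ⟨rfl, by simp, ?_⟩
  intro x hx
  simp

-- B's rendered row y equals the function of the hit bit and the original cell
def pvRowR (hit : List (List Bool)) (yr : Int × List String) : List String :=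
  (PySem.List.enumerate yr.2).map (fun xc => pvRenderCell hit yr.1 xc.1 xc.2)

-- inner fold of B, closed form
lemma pvInnerFold (hit : List (List Bool)) (r : Int) :
    ∀ (l : List (Int × String)) (cs : List String) (t : Int),
    l.foldl (fun (st2 : List String × Int) xc =>
        let ch := pvRenderCell hit r xc.1 xc.2
        (st2.1 ++ [ch], st2.2 + (if ch == "O" then (1 : Int) else 0))) (cs, t)
    = (cs ++ l.map (fun xc => pvRenderCell hit r xc.1 xc.2),
       t + ((l.map (fun xc => pvRenderCell hit r xc.1 xc.2)).count "O" : Int)) := by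
  intro l
  induction l with
  | nil => intro cs t; simp
  | cons x l ih =>
    intro cs t
    rw [List.foldl_cons, ih]
    simp only [List.map_cons, List.count_cons]
    rw [Prod.mk.injEq]
    constructor
    · simp
    · by_cases hx : (pvRenderCell hit r x.1 x.2 == "O") = true
      · simp [hx]; ring
      · have hxf : (pvRenderCell hit r x.1 x.2 == "O") = false := by
          cases hb : (pvRenderCell hit r x.1 x.2 == "O")
          · rfl
          · exact absurd hb hx
        simp [hxf]

-- outer fold of B, closed form
lemma pvOuterFold (hit : List (List Bool)) :
    ∀ (l : List (Int × List String)) (ls : List String) (t : Int),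
    l.foldl (fun (st : List String × Int) yr =>
        let inner := (PySem.List.enumerate yr.2).foldl (fun (st2 : List String × Int) xc =>
            let ch := pvRenderCell hit yr.1 xc.1 xc.2
            (st2.1 ++ [ch], st2.2 + (if ch == "O" then (1 : Int) else 0)))
          (([] : List String), st.2)
        (st.1 ++ [PySem.Str.join "" inner.1], inner.2)) (ls, t)
    = (ls ++ l.map (fun yr => PySem.Str.join "" (pvRowR hit yr)),
       t + ((l.map (fun yr => ((pvRowR hit yr).count "O" : Int))).sum)) := by
  intro l
  induction l with
  | nil => intro ls t; simp
  | cons yr l ih =>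
    intro ls t
    rw [List.foldl_cons]
    simp only [pvInnerFold hit yr.1 (PySem.List.enumerate yr.2) [] t]
    rw [ih]
    simp only [List.map_cons, List.sum_cons, List.nil_append]
    rw [Prod.mk.injEq]
    constructor
    · simp [pvRowR]
    · simp only [pvRowR]; ring

-- the rendered rows are exactly A's final rows
lemma pvRows (grid g : List (List String)) (hit : List (List Bool)) (hI : pvInv grid g hit) :
    (PySem.List.enumerate grid).map (fun yr => pvRowR hit yr) = g := by
  obtain ⟨hglen, hhlen, hcell⟩ := hI
  apply List.ext_getElem
  · simp [PySem.List.length_enumerate, hglen]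
  · intro y hy1 hy2
    have hyG : y < grid.length := by
      simpa [PySem.List.length_enumerate] using hy1
    have hyg : y < g.length := by rw [hglen]; exact hyG
    have hyE : y < (PySem.List.enumerate grid 0).length := by
      rwa [PySem.List.length_enumerate]
    rw [List.getElem_map]
    show pvRowR hit ((PySem.List.enumerate grid 0)[y]) = g[y]
    rw [PySem.List.getElem_enumerate grid 0 y hyE]
    unfold pvRowR
    obtain ⟨hgl, hhl, hcells⟩ := hcell y hyG
    have hleny : g[y].length = grid[y].length := by
      rw [← List.getD_eq_getElem g [] hyg, ← List.getD_eq_getElem grid [] hyG]; exact hgl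
    apply List.ext_getElem
    · simp [PySem.List.length_enumerate, hleny]
    · intro x hx1 hx2
      have hxgrid : x < grid[y].length := by
        simpa [PySem.List.length_enumerate] using hx1
      have hxE : x < (PySem.List.enumerate grid[y] 0).length := by
        rwa [PySem.List.length_enumerate]
      rw [List.getElem_map]
      show pvRenderCell hit (0 + (y : Int)) (PySem.List.enumerate grid[y] 0)[x].1
          (PySem.List.enumerate grid[y] 0)[x].2 = g[y][x]
      rw [PySem.List.getElem_enumerate grid[y] 0 x hxE]
      have hval := hcells x (by rw [List.getD_eq_getElem grid [] hyG]; exact hxgrid)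
      rw [List.getD_eq_getElem g [] hyg, List.getD_eq_getElem grid [] hyG,
        List.getD_eq_getElem _ "" (by rw [hleny]; exact hxgrid),
        List.getD_eq_getElem _ "" hxgrid] at hval
      have hhitrow : PySem.List.pyGetD hit (0 + (y : Int)) [] = hit.getD y [] := by
        rw [zero_add, PySem.List.pyGetD_natCast]
      have hhitbit : PySem.List.pyGetD (hit.getD y []) (0 + (x : Int)) false
          = (hit.getD y []).getD x false := by
        rw [zero_add, PySem.List.pyGetD_natCast]
      unfold pvRenderCell
      rw [hhitrow, hhitbit, hval]
      simp [pvMk]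

-- fold-to-sum bridge for A's count
lemma pvFoldCount (g : List (List String)) : ∀ (a : Int),
    g.foldl (fun acc row => acc + (PySem.List.count row "O" : Int)) a =
      a + ((g.map (fun r => r.count "O")).sum : Nat) := by
  induction g with
  | nil => intro a; simp
  | cons r g ih =>
    intro a
    rw [List.foldl_cons, ih]
    simp [PySem.List.count_eq]
    ring

-- sum of Int-cast counts equals cast of Nat sum
lemma pvSumCast (g : List (List String)) :
    (g.map (fun r => ((r.count "O" : Nat) : Int))).sum = ((g.map (fun r => r.count "O")).sum : Nat) := by
  induction g with
  | nil => simp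
  | cons r g ih => simp [ih]

-- ===== VERDICT (by name: the statement is the Claim_ definition above) =====
theorem visualize_combined_map_spec : Claim_equal_visualize_combined_map := by
  intro grid paths _ hpre
  unfold Spec_visualize_combined_map visualize_combined_map visualize_combined_map_alt
  have hI := pvFoldPaths grid paths grid _ hpre (pvInit grid)
  dsimp only
  rw [pvOuterFold]
  set g := paths.foldl (fun g path => path.foldl pvMarkA g) grid with hg
  set hit := paths.foldl (fun h path => path.foldl pvStamp h)
      (grid.map (fun row => List.replicate row.length false)) with hhit
  have hrows := pvRows grid g hit hI
  rw [Prod.mk.injEq]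
  constructor
  · have : (PySem.List.enumerate grid).map (fun yr => PySem.Str.join "" (pvRowR hit yr))
        = g.map (fun row => PySem.Str.join "" row) := by
      rw [← hrows, List.map_map]; rfl
    dsimp only
    rw [this, List.nil_append]
  · rw [pvFoldCount]
    dsimp only
    have : (PySem.List.enumerate grid).map (fun yr => ((pvRowR hit yr).count "O" : Int))
        = g.map (fun r => ((r.count "O" : Nat) : Int)) := by
      rw [← hrows, List.map_map]; rfl
    rw [this, pvSumCast]
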